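-- pv_equiv track=rewrite | github.com/PromytheasN/AdventOfCode | Day_5/main.py | binary_transform
-- ===== SOURCE A (Python) =====
-- def binary_transform(all_seats):
--
--     all_seats_b = []
--     for seat in all_seats:
--
--         seat = seat.replace("B", "1")
--         seat = seat.replace("F", "0")
--         seat = seat.replace("L", "0")
--         seat = seat.replace("R", "1")
--         all_seats_b.append(seat)
--
--     return all_seats_b
-- ===== SOURCE B (Python) =====
-- _MAPPING = {"B": "1", "F": "0", "L": "0", "R": "1"}
--
-- def binary_transform(all_seats):
--     return ["".join(_MAPPING.get(c, c) for c in seat) for seat in all_seats]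
-- ===== Notes on version B (the rewrite author's own statement) =====
-- stated objective: simpler
-- what changed: Replaces four sequential full-string str.replace scans per seat with a single character-by-character pass through one mapping dict, built as a list comprehension instead of an accumulator loop.
import Mathlib
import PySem

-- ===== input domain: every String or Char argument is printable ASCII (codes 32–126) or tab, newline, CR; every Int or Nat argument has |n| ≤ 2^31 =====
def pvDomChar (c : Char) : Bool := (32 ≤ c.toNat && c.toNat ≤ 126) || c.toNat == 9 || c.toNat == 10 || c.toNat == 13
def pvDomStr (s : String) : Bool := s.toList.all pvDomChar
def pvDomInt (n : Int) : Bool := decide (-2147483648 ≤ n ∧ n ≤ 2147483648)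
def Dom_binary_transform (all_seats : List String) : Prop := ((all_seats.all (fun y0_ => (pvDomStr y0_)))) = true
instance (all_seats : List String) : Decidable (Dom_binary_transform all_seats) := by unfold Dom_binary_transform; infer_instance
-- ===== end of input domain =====

-- B replaces A's four sequential str.replace scans per seat by one character-by-character
-- pass through a single mapping dict (objective: simpler, one pass instead of four).

-- ===== PORT A =====
-- Python A: loop over seats, four str.replace calls in sequence, append to accumulator.
def binary_transform (all_seats : List String) : List String :=
  all_seats.foldl
    (fun all_seats_b seat =>
      let seat := PySem.Str.replace seat "B" "1"
      let seat := PySem.Str.replace seat "F" "0"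
      let seat := PySem.Str.replace seat "L" "0"
      let seat := PySem.Str.replace seat "R" "1"
      all_seats_b ++ [seat])
    []

-- ===== PORT B =====
-- Python B: one mapping dict, per-seat single pass joining mapping.get(c, c).
def pvMapping : PySem.Dict Char Char :=
  ((((PySem.Dict.empty.insert 'B' '1').insert 'F' '0').insert 'L' '0').insert 'R' '1')

def binary_transform_alt (all_seats : List String) : List String :=
  all_seats.map (fun seat => String.ofList (seat.toList.map (fun c => pvMapping.getD c c)))

-- ===== PRECONDITION & SPEC =====
def Spec_binary_transform (all_seats : List String) (out : List String) : Prop := out = binary_transform_alt all_seats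
instance (all_seats : List String) (out : List String) : Decidable (Spec_binary_transform all_seats out) := by unfold Spec_binary_transform; infer_instance

-- ===== CLAIM (what is proved, stated in full; the proofs are below) =====
def Claim_equal_binary_transform : Prop := ∀ (all_seats : List String), Dom_binary_transform all_seats → Spec_binary_transform all_seats (binary_transform all_seats)

-- ===== LEMMAS AND PROOFS =====

-- replace.go with a single-char old and enough fuel is a per-character map
theorem replace_go_single (a b : Char) :
    ∀ (l : List Char) (n : Nat) (acc : List Char), l.length ≤ n →
      PySem.Chars.replace.go [a] [b] n l acc
        = acc.reverse ++ l.map (fun c => if c = a then b else c) := by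
  intro l
  induction l with
  | nil =>
    intro n acc _
    cases n <;> simp [PySem.Chars.replace.go]
  | cons c t ih =>
    intro n acc h
    cases n with
    | zero => simp at h
    | succ m =>
      simp only [PySem.Chars.replace.go]
      by_cases hc : c = a
      · subst hc
        simp only [List.isPrefixOf, BEq.rfl, Bool.true_and, if_pos,
          List.length_cons, List.length_nil, List.drop_succ_cons, List.drop_zero]
        rw [ih m _ (by simpa using h)]
        simp
      · have : ([a].isPrefixOf (c :: t)) = false := by
          simp [List.isPrefixOf]
          exact fun hh => absurd hh.symm hc
        rw [this]
        simp only [Bool.false_eq_true, if_false]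
        rw [ih m _ (by simpa using h)]
        simp [hc]

theorem replace_single (a b : Char) (s : List Char) :
    PySem.Chars.replace s [a] [b] = s.map (fun c => if c = a then b else c) := by
  simp only [PySem.Chars.replace, List.isEmpty_cons, Bool.false_eq_true, if_false]
  rw [replace_go_single a b s s.length [] (le_refl _)]
  simp

theorem mapping_getD (c : Char) :
    pvMapping.getD c c
      = if c = 'B' then '1' else if c = 'F' then '0' else
        if c = 'L' then '0' else if c = 'R' then '1' else c := by
  by_cases hB : c = 'B' <;> by_cases hF : c = 'F' <;> by_cases hL : c = 'L' <;>
    by_cases hR : c = 'R' <;>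
  · first
    | (subst_vars; rfl)
    | (have eB : ('B' == c) = false := by simp [Ne.symm hB]
       have eF : ('F' == c) = false := by simp [Ne.symm hF]
       have eL : ('L' == c) = false := by simp [Ne.symm hL]
       have eR : ('R' == c) = false := by simp [Ne.symm hR]
       simp [pvMapping, PySem.Dict.getD, PySem.Dict.get?, PySem.Dict.insert, PySem.Dict.empty,
         List.find?, eB, eF, eL, eR, hB, hF, hL, hR])

theorem per_seat (seat : String) :
    PySem.Str.replace (PySem.Str.replace (PySem.Str.replace (PySem.Str.replace seat "B" "1") "F" "0") "L" "0") "R" "1"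
      = String.ofList (seat.toList.map (fun c => pvMapping.getD c c)) := by
  apply String.toList_injective
  simp only [PySem.Str.toList_replace, String.toList_ofList,
    show ("B" : String).toList = ['B'] from rfl, show ("1" : String).toList = ['1'] from rfl,
    show ("F" : String).toList = ['F'] from rfl, show ("0" : String).toList = ['0'] from rfl,
    show ("L" : String).toList = ['L'] from rfl, show ("R" : String).toList = ['R'] from rfl,
    replace_single]
  simp only [List.map_map]
  apply List.map_congr_left
  intro c _
  simp only [Function.comp, mapping_getD]
  by_cases hB : c = 'B' <;> by_cases hF : c = 'F' <;> by_cases hL : c = 'L' <;>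
    by_cases hR : c = 'R' <;> simp_all

theorem foldl_append_map (f : String → String) :
    ∀ (xs : List String) (acc : List String),
      xs.foldl (fun r s => r ++ [f s]) acc = acc ++ xs.map f := by
  intro xs
  induction xs with
  | nil => simp
  | cons x t ih => intro acc; simp [ih]

-- ===== VERDICT (by name: the statement is the Claim_ definition above) =====
theorem binary_transform_spec : Claim_equal_binary_transform := by
  intro all_seats _
  unfold Spec_binary_transform binary_transform binary_transform_alt
  rw [foldl_append_map]
  simp only [List.nil_append]
  apply List.map_congr_left
  intro seat _
  exact per_seat seat
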